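-- pv_equiv track=rewrite | github.com/SoumilB7/UML_agent | Backend/utils/editor.py | _apply_add_state
-- ===== SOURCE A (Python) =====
-- def _apply_add_state(lines: list, details: dict) -> list:
--     """Add a state to a state diagram."""
--     name = details.get("name")
--     parent = details.get("parent")
--
--     if not name:
--         return lines
--
--     if parent:
--         # Find parent state block
--         in_parent = False
--         for i, line in enumerate(lines):
--             if f"state {parent}" in line:
--                 in_parent = True
--             elif in_parent and line.strip() == "}":
--                 lines.insert(i, f"    {name}")
--                 break
--     else:
--         # Add at end
--         lines.append(name)
--
--     return lines
-- ===== SOURCE B (Python) =====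
-- def _apply_add_state(lines: list, details: dict) -> list:
--     """Add a state to a state diagram (single reversed pass tracking the nearest closing brace)."""
--     name = details.get("name")
--     parent = details.get("parent")
--
--     if not name:
--         return lines
--
--     if not parent:
--         lines.append(name)
--         return lines
--
--     marker = f"state {parent}"
--     q = None   # insertion point: nearest '}' after the first parent line
--     b = None   # nearest '}' strictly to the right of the current position
--     for i in range(len(lines) - 1, -1, -1):
--         line = lines[i]
--         if marker in line:
--             q = b
--         if line.strip() == "}":
--             b = i
--     if q is not None:
--         lines.insert(q, f"    {name}")
--     return lines
-- ===== Notes on version B (the rewrite author's own statement) =====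
-- stated objective: alternative
-- what changed: Replaces A's forward scan with an in_parent flag by a single reversed (right-to-left) pass that tracks the nearest closing-brace index to the right and records it whenever a parent-marker line is passed, so the final record is the insertion point after the first marker.
import Mathlib
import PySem

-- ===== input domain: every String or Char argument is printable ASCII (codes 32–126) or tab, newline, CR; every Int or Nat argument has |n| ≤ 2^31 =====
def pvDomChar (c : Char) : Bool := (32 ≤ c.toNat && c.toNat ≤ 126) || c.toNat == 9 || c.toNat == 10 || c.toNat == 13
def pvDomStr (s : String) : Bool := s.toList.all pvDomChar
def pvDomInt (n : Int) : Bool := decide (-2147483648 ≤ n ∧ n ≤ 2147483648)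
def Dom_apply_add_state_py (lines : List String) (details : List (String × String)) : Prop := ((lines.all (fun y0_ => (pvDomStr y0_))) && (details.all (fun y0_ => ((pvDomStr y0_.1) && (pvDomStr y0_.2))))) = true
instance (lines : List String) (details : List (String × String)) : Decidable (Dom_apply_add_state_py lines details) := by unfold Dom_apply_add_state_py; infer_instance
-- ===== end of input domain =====

-- B replaces A's forward scan with an in_parent flag by one reversed pass that tracks the
-- nearest closing-brace index to the right; objective: alternative (same cost, different traversal).
-- Both Pythons mutate `lines` in place the same way; the theorem is about the return value.

-- ===== PORT A =====
-- A's for-loop with the in_parent flag and break: structural recursion over the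
-- remaining lines, carrying the index i, the flag, and the whole list for insert.
def pvALoop (all : List String) (target ins : String) : Nat → Bool → List String → List String
  | _, _, [] => all
  | i, inp, l :: rest =>
    if PySem.Str.isIn target l then pvALoop all target ins (i + 1) true rest
    else if inp && (PySem.Str.strip l == "}") then PySem.List.insert all (i : Int) ins
    else pvALoop all target ins (i + 1) inp rest

def apply_add_state_py (lines : List String) (details : List (String × String)) : List String :=
  let name := ((PySem.Dict.mk details).get? "name").getD ""
  let parent := ((PySem.Dict.mk details).get? "parent").getD ""
  if name = "" then lines
  else if parent ≠ "" then
    pvALoop lines ("state " ++ parent) ("    " ++ name) 0 false lines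
  else lines ++ [name]

-- ===== PORT B =====
-- B's reversed loop body: at each line (visited right to left) first record the nearest
-- brace to the right as the candidate insertion point if the line contains the marker,
-- then update the nearest-brace tracker.  acc = (q, b).
def pvBStep (marker : String) (p : Int × String) (acc : Option Int × Option Int) : Option Int × Option Int :=
  let q := if PySem.Str.isIn marker p.2 then acc.2 else acc.1
  let b := if PySem.Str.strip p.2 == "}" then some p.1 else acc.2
  (q, b)

def apply_add_state_py_alt (lines : List String) (details : List (String × String)) : List String :=
  let name := ((PySem.Dict.mk details).get? "name").getD ""
  let parent := ((PySem.Dict.mk details).get? "parent").getD ""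
  if name = "" then lines
  else if parent = "" then lines ++ [name]
  else
    -- for i in range(len(lines)-1, -1, -1): right-to-left visit = foldr over enumerate
    match ((PySem.List.enumerate lines 0).foldr (pvBStep ("state " ++ parent)) (none, none)).1 with
    | none => lines
    | some q => PySem.List.insert lines q ("    " ++ name)

-- ===== PRECONDITION & SPEC =====
def Spec_apply_add_state_py (lines : List String) (details : List (String × String)) (out : List String) : Prop := out = apply_add_state_py_alt lines details
instance (lines : List String) (details : List (String × String)) (out : List String) : Decidable (Spec_apply_add_state_py lines details out) := by unfold Spec_apply_add_state_py; infer_instance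

-- ===== CLAIM (what is proved, stated in full; the proofs are below) =====
def Claim_equal_apply_add_state_py : Prop := ∀ (lines : List String) (details : List (String × String)), Dom_apply_add_state_py lines details → Spec_apply_add_state_py lines details (apply_add_state_py lines details)

-- ===== LEMMAS AND PROOFS =====

-- Every character of s is whitespace or survives strip.
theorem mem_strip_or_isspace (c : Char) (cs : List Char) (h : c ∈ cs) :
    c ∈ PySem.Chars.strip cs ∨ PySem.Chars.isspace c = true := by
  unfold PySem.Chars.strip PySem.Chars.rstrip PySem.Chars.lstrip
  by_cases hsp : PySem.Chars.isspace c = true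
  · exact Or.inr hsp
  · left
    have hsplit : cs = cs.takeWhile PySem.Chars.isspace ++ cs.dropWhile PySem.Chars.isspace :=
      (List.takeWhile_append_dropWhile (p := PySem.Chars.isspace) (l := cs)).symm
    have h1 : c ∈ cs.dropWhile PySem.Chars.isspace := by
      rcases List.mem_append.mp (hsplit ▸ h) with h' | h'
      · exact absurd (List.mem_takeWhile_imp h') hsp
      · exact h'
    have h2 : c ∈ (cs.dropWhile PySem.Chars.isspace).reverse := List.mem_reverse.mpr h1
    set ds := (cs.dropWhile PySem.Chars.isspace).reverse with hds
    have hsplit2 : ds = ds.takeWhile PySem.Chars.isspace ++ ds.dropWhile PySem.Chars.isspace :=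
      (List.takeWhile_append_dropWhile (p := PySem.Chars.isspace) (l := ds)).symm
    rw [List.mem_reverse]
    rcases List.mem_append.mp (hsplit2 ▸ h2) with h' | h'
    · exact absurd (List.mem_takeWhile_imp h') hsp
    · exact h'

-- A line that strips to "}" cannot contain "state " ++ parent.
theorem not_isIn_of_strip_brace (parent l : String)
    (hs : (PySem.Str.strip l == "}") = true) :
    PySem.Str.isIn ("state " ++ parent) l = false := by
  rw [Bool.eq_false_iff]
  intro hin
  have hinf := (PySem.Str.isIn_iff_infix _ _).mp hin
  have hsmem : 's' ∈ ("state " ++ parent).toList := by simp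
  have hmem : 's' ∈ l.toList := hinf.mem hsmem
  have hstrip : PySem.Chars.strip l.toList = ['}'] := by
    rw [← PySem.Str.toList_strip]
    have he : PySem.Str.strip l = "}" := eq_of_beq hs
    rw [he]; rfl
  rcases mem_strip_or_isspace 's' l.toList hmem with h | h
  · rw [hstrip] at h; simp at h
  · simp [PySem.Chars.isspace] at h

-- Phase 2 of A (in_parent = true): the loop stops at the first line stripping to "}".
theorem pvALoop_true (parent : String) (all : List String) (ins : String) :
    ∀ (rest : List String) (i : Nat),
    pvALoop all ("state " ++ parent) ins i true rest =
      match rest.findIdx? (fun l => PySem.Str.strip l == "}") with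
      | none => all
      | some j => PySem.List.insert all ((i + j : Nat) : Int) ins := by
  intro rest
  induction rest with
  | nil => intro i; simp [pvALoop]
  | cons l rest ih =>
    intro i
    simp only [pvALoop, List.findIdx?_cons]
    by_cases hb : (PySem.Str.strip l == "}") = true
    · rw [not_isIn_of_strip_brace parent l hb, if_pos hb]
      simp
      exact fun hc => absurd (eq_of_beq hb) hc
    · by_cases hin : PySem.Str.isIn ("state " ++ parent) l = true
      · rw [if_pos hin, if_neg hb, ih (i + 1)]
        cases h : rest.findIdx? (fun l => PySem.Str.strip l == "}") with
        | none => simp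
        | some j => simp [show (i + 1 + j : Nat) = (i + (j + 1) : Nat) from by omega]
      · rw [if_neg hin, if_neg (by simp [hb] :
            ¬((true && (PySem.Str.strip l == "}")) = true)), if_neg hb, ih (i + 1)]
        cases h : rest.findIdx? (fun l => PySem.Str.strip l == "}") with
        | none => simp
        | some j => simp [show (i + 1 + j : Nat) = (i + (j + 1) : Nat) from by omega]

-- Phase 1 of A (in_parent = false): the loop skips to just past the first parent line.
theorem pvALoop_false (target : String) (all : List String) (ins : String) :
    ∀ (rest : List String) (i : Nat),
    pvALoop all target ins i false rest =
      match rest.findIdx? (fun l => PySem.Str.isIn target l) with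
      | none => all
      | some k => pvALoop all target ins (i + k + 1) true (rest.drop (k + 1)) := by
  intro rest
  induction rest with
  | nil => intro i; simp [pvALoop]
  | cons l rest ih =>
    intro i
    simp only [pvALoop, List.findIdx?_cons]
    by_cases hin : PySem.Str.isIn target l = true
    · rw [if_pos hin, if_pos hin]
      simp
    · rw [if_neg hin,
        if_neg (by simp : ¬((false && (PySem.Str.strip l == "}")) = true)),
        if_neg hin, ih (i + 1)]
      cases h : rest.findIdx? (fun l => PySem.Str.isIn target l) with
      | none => simp
      | some k => simp [show (i + 1 + k + 1 : Nat) = (i + (k + 1) + 1 : Nat) from by omega]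

-- B's reversed pass, characterized: the b-component is the first brace index (offset by k),
-- the q-component is the first brace index strictly after the first marker line.
theorem pvBFold_eq (marker : String) :
    ∀ (lines : List String) (k : Int),
    (PySem.List.enumerate lines k).foldr (pvBStep marker) (none, none) =
      ((match lines.findIdx? (fun l => PySem.Str.isIn marker l) with
        | none => none
        | some p => ((lines.drop (p + 1)).findIdx? (fun l => PySem.Str.strip l == "}")).map
            (fun j => k + p + 1 + j)),
       (lines.findIdx? (fun l => PySem.Str.strip l == "}")).map (fun j => k + j)) := by
  intro lines
  induction lines with
  | nil => intro k; simp [PySem.List.enumerate]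
  | cons l rest ih =>
    intro k
    rw [PySem.List.enumerate_cons, List.foldr_cons, ih (k + 1)]
    simp only [List.findIdx?_cons, pvBStep]
    by_cases hin : PySem.Str.isIn marker l = true <;>
      by_cases hb : (PySem.Str.strip l == "}") = true <;>
        simp only [hin, hb, if_true, List.drop_succ_cons] <;>
          refine Prod.ext ?_ ?_
    -- hin, hb
    · cases h : rest.findIdx? (fun l => PySem.Str.strip l == "}") <;> simp [h] <;> omega
    · simp
    -- hin, ¬hb
    · cases h : rest.findIdx? (fun l => PySem.Str.strip l == "}") <;> simp [h] <;> omega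
    · cases h : rest.findIdx? (fun l => PySem.Str.strip l == "}") <;> simp [h] <;> omega
    -- ¬hin, hb
    · cases hm : rest.findIdx? (fun l => PySem.Str.isIn marker l) with
      | none => simp [hm]
      | some p =>
        simp only [hm, Option.map_some]
        cases h : (rest.drop (p + 1)).findIdx? (fun l => PySem.Str.strip l == "}") <;>
          simp [h] <;> omega
    · simp
    -- ¬hin, ¬hb
    · cases hm : rest.findIdx? (fun l => PySem.Str.isIn marker l) with
      | none => simp [hm]
      | some p =>
        simp only [hm, Option.map_some]
        cases h : (rest.drop (p + 1)).findIdx? (fun l => PySem.Str.strip l == "}") <;>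
          simp [h] <;> omega
    · cases h : rest.findIdx? (fun l => PySem.Str.strip l == "}") <;> simp [h] <;> omega

-- ===== VERDICT (by name: the statement is the Claim_ definition above) =====
theorem apply_add_state_py_spec : Claim_equal_apply_add_state_py := by
  intro lines details _
  unfold Spec_apply_add_state_py apply_add_state_py apply_add_state_py_alt
  set name := ((PySem.Dict.mk details).get? "name").getD "" with hname
  set parent := ((PySem.Dict.mk details).get? "parent").getD "" with hparent
  by_cases h1 : name = ""
  · simp [h1]
  · rw [if_neg h1, if_neg h1]
    by_cases h2 : parent = ""
    · simp [h2]
    · rw [if_pos h2, if_neg h2, pvALoop_false, pvBFold_eq]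
      cases hp : lines.findIdx? (fun l => PySem.Str.isIn ("state " ++ parent) l) with
      | none => rfl
      | some p =>
        simp only [pvALoop_true]
        cases hq : (lines.drop (p + 1)).findIdx? (fun l => PySem.Str.strip l == "}") with
        | none => rfl
        | some j =>
          congr 1
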